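-- pv_equiv track=rewrite | github.com/Orthologues/BINP29Project | SmithWaterman.py | string_alignment
-- ===== SOURCE A (Python) =====
-- def string_alignment(aligned_query,aligned_reference):
--     identity,gaps,mismatches=0,0,0
--     alignment_string=''
--     for base1,base2 in zip(aligned_query,aligned_reference):
--         if base1==base2:
--             alignment_string=''.join((alignment_string,'|'))
--             identity+=1
--         elif '-' in (base1,base2):
--             alignment_string = ''.join((alignment_string, '-'))
--             gaps+=1
--         else:
--             alignment_string = ''.join((alignment_string, ':'))
--             mismatches+=1
--
--     return alignment_string,identity,gaps,mismatches
-- ===== SOURCE B (Python) =====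
-- def string_alignment(aligned_query, aligned_reference):
--     n = min(len(aligned_query), len(aligned_reference))
--     match_idx = [i for i in range(n) if aligned_query[i] == aligned_reference[i]]
--     gap_idx = [i for i in range(n)
--                if aligned_query[i] != aligned_reference[i]
--                and (aligned_query[i] == '-' or aligned_reference[i] == '-')]
--     symbols = [':'] * n
--     for i in gap_idx:
--         symbols[i] = '-'
--     for i in match_idx:
--         symbols[i] = '|'
--     return ''.join(symbols), len(match_idx), len(gap_idx), n - len(match_idx) - len(gap_idx)
-- ===== Notes on version B (the rewrite author's own statement) =====
-- stated objective: faster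
-- what changed: B partitions positions into match/gap index lists by two separate filter scans, paints the symbols into a preallocated array at those indices (default ':'), and derives the counts as list lengths and arithmetic, replacing A's fused classify-and-increment loop that rebuilds the string by concatenation each step.
import Mathlib
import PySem

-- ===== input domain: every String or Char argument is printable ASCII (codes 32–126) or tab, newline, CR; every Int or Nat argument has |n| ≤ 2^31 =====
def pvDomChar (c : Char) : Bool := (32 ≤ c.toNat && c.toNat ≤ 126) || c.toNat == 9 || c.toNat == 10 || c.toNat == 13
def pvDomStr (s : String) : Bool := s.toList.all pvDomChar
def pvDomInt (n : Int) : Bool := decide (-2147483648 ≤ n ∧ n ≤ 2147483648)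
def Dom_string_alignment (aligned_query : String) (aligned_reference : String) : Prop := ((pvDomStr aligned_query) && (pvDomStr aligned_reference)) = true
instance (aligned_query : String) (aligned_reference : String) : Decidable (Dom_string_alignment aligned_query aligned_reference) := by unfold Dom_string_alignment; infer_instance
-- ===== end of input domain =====

-- B partitions positions into match/gap index lists by separate filter scans, paints
-- symbols into a preallocated ':'-array at those indices, and derives the counts as list
-- lengths and arithmetic, replacing A's fused loop that rebuilds the string each step
-- (objective: faster, measured).

-- ===== PORT A =====
-- A's loop state: (alignment_string as List Char, identity, gaps, mismatches)
def pvStepA (st : List Char × Int × Int × Int) (p : Char × Char) : List Char × Int × Int × Int :=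
  if p.1 == p.2 then (st.1 ++ ['|'], st.2.1 + 1, st.2.2.1, st.2.2.2)
  else if p.1 == '-' || p.2 == '-' then (st.1 ++ ['-'], st.2.1, st.2.2.1 + 1, st.2.2.2)
  else (st.1 ++ [':'], st.2.1, st.2.2.1, st.2.2.2 + 1)

def string_alignment (aligned_query : String) (aligned_reference : String) : String × Int × Int × Int :=
  let st := (aligned_query.toList.zip aligned_reference.toList).foldl pvStepA ([], 0, 0, 0)
  (String.ofList st.1, st.2.1, st.2.2.1, st.2.2.2)

-- ===== PORT B =====
def string_alignment_alt (aligned_query : String) (aligned_reference : String) : String × Int × Int × Int :=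
  let ql := aligned_query.toList
  let rl := aligned_reference.toList
  let n := min ql.length rl.length
  let matchIdx := (List.range n).filter (fun i => ql.getD i ' ' == rl.getD i ' ')
  let gapIdx := (List.range n).filter
    (fun i => !(ql.getD i ' ' == rl.getD i ' ') && (ql.getD i ' ' == '-' || rl.getD i ' ' == '-'))
  let painted := matchIdx.foldl (fun a i => a.set i '|')
    (gapIdx.foldl (fun a i => a.set i '-') (List.replicate n ':'))
  (String.ofList painted, (matchIdx.length : Int), (gapIdx.length : Int),
   (n : Int) - matchIdx.length - gapIdx.length)

-- ===== PRECONDITION & SPEC =====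
def Spec_string_alignment (aligned_query : String) (aligned_reference : String) (out : String × Int × Int × Int) : Prop := out = string_alignment_alt aligned_query aligned_reference
instance (aligned_query : String) (aligned_reference : String) (out : String × Int × Int × Int) : Decidable (Spec_string_alignment aligned_query aligned_reference out) := by unfold Spec_string_alignment; infer_instance

-- ===== CLAIM (what is proved, stated in full; the proofs are below) =====
def Claim_equal_string_alignment : Prop := ∀ (aligned_query : String) (aligned_reference : String), Dom_string_alignment aligned_query aligned_reference → Spec_string_alignment aligned_query aligned_reference (string_alignment aligned_query aligned_reference)

-- ===== LEMMAS AND PROOFS =====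
-- the per-position symbol both programs implicitly compute
def pvSym (p : Char × Char) : Char :=
  if p.1 == p.2 then '|' else if p.1 == '-' || p.2 == '-' then '-' else ':'

-- A's fold appends exactly the symbols and counts them as it goes.
theorem pvFoldA_eq (l : List (Char × Char)) (acc : List Char) (i g m : Int) :
    l.foldl pvStepA (acc, i, g, m) =
      (acc ++ l.map pvSym,
       i + ((l.map pvSym).count '|' : Nat),
       g + ((l.map pvSym).count '-' : Nat),
       m + ((l.map pvSym).count ':' : Nat)) := by
  induction l generalizing acc i g m with
  | nil => simp
  | cons p t ih =>
    simp only [List.foldl_cons, List.map_cons, pvStepA, pvSym]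
    split_ifs with h1 h2
    · have hne1 : ('|' : Char) ≠ '-' := by decide
      have hne2 : ('|' : Char) ≠ ':' := by decide
      simp [ih, hne1, hne2]; ring
    · have hne1 : ('-' : Char) ≠ '|' := by decide
      have hne2 : ('-' : Char) ≠ ':' := by decide
      simp [ih, hne1, hne2]; ring
    · have hne1 : (':' : Char) ≠ '|' := by decide
      have hne2 : (':' : Char) ≠ '-' := by decide
      simp [ih, hne1, hne2]; ring

theorem pvFoldSet_length (is : List Nat) (v : Char) (a : List Char) :
    (is.foldl (fun a i => a.set i v) a).length = a.length := by
  induction is generalizing a with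
  | nil => rfl
  | cons i t ih => simp [List.foldl_cons, ih]

theorem pvFoldSet_getElem (is : List Nat) (v : Char) (a : List Char) (j : Nat)
    (hj : j < a.length) :
    (is.foldl (fun a i => a.set i v) a)[j]'(by rw [pvFoldSet_length]; exact hj) =
      if j ∈ is then v else a[j] := by
  induction is generalizing a with
  | nil => simp
  | cons i t ih =>
    simp only [List.foldl_cons]
    rw [ih (a.set i v) (by simpa using hj)]
    by_cases h : j ∈ t
    · simp [h]
    · by_cases hij : i = j
      · simp [h, hij, List.getElem_set, hj]
      · have hmem : j ∉ i :: t := by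
          simp only [List.mem_cons]
          rintro (rfl | hh)
          · exact hij rfl
          · exact h hh
        simp [List.getElem_set, hij, hmem]
        exact fun hh => absurd hh h

-- the symbol written by B's painting at one cell
theorem pvCell (c1 c2 : Char) :
    (if (c1 == c2) = true then '|'
     else if (!(c1 == c2) && (c1 == '-' || c2 == '-')) = true then '-' else ':')
      = pvSym (c1, c2) := by
  unfold pvSym
  by_cases h : c1 = c2
  · simp [h]
  · by_cases hd : (c1 == '-' || c2 == '-') = true <;> simp [h, hd]

theorem pvSym_eq_bar (c1 c2 : Char) : (pvSym (c1, c2) == '|') = (c1 == c2) := by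
  unfold pvSym
  by_cases h : c1 = c2
  · simp [h]
  · by_cases hd : (c1 == '-' || c2 == '-') = true <;> simp [h, hd]

theorem pvSym_eq_dash (c1 c2 : Char) :
    (pvSym (c1, c2) == '-') = (!(c1 == c2) && (c1 == '-' || c2 == '-')) := by
  unfold pvSym
  by_cases h : c1 = c2
  · simp [h]
  · by_cases hd : (c1 == '-' || c2 == '-') = true <;> simp [h, hd]

theorem pvSym_eq_colon (c1 c2 : Char) :
    (pvSym (c1, c2) == ':')
      = (!(c1 == c2) && !(!(c1 == c2) && (c1 == '-' || c2 == '-'))) := by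
  unfold pvSym
  by_cases h : c1 = c2
  · simp [h]
  · by_cases hd : (c1 == '-' || c2 == '-') = true <;> simp [h, hd]

-- counting a symbol over a mapped range equals filtering by the matching predicate
theorem pvLenFilter {α : Type} (l : List α) (p : α → Bool) :
    (l.filter p).length = l.countP p := by
  induction l with
  | nil => rfl
  | cons a t ih =>
    by_cases h : p a = true <;> simp [List.filter_cons, List.countP_cons, h, ih]

theorem pvCountRange (n : Nat) (c : Char) (f : Nat → Char) (p : Nat → Bool)
    (hp : ∀ i, (f i == c) = p i) :
    ((List.range n).map f).count c = ((List.range n).filter p).length := by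
  rw [pvLenFilter, List.count, List.countP_map]
  apply List.countP_congr
  intro i _
  simp only [Function.comp_apply, hp i]

-- three mutually exclusive, exhaustive predicates count up to the length
theorem pvCountP_tri {α : Type} (l : List α) (p1 p2 p3 : α → Bool)
    (h3 : ∀ a, p3 a = (!p1 a && !p2 a)) (h12 : ∀ a, p1 a = true → p2 a = false) :
    l.countP p1 + l.countP p2 + l.countP p3 = l.length := by
  induction l with
  | nil => simp
  | cons a t ih =>
    simp only [List.countP_cons, List.length_cons]
    by_cases h1 : p1 a = true
    · have h2 := h12 a h1
      have h3a := h3 a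
      simp [h1, h2] at h3a ⊢
      simp [h3a]; omega
    · simp at h1
      by_cases h2 : p2 a = true
      · have h3a := h3 a
        simp [h1, h2] at h3a ⊢
        simp [h3a]; omega
      · simp at h2
        have h3a := h3 a
        simp [h1, h2] at h3a ⊢
        simp [h3a]; omega

-- the zipped symbol list seen positionally over the range
theorem pvMap_zip (ql rl : List Char) :
    (ql.zip rl).map pvSym
      = (List.range (min ql.length rl.length)).map
          (fun i => pvSym (ql.getD i ' ', rl.getD i ' ')) := by
  apply List.ext_getElem
  · simp
  · intro i h1 h2
    have hi : i < min ql.length rl.length := by simpa using h2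
    have hiq : i < ql.length := lt_of_lt_of_le hi (Nat.min_le_left _ _)
    have hir : i < rl.length := lt_of_lt_of_le hi (Nat.min_le_right _ _)
    simp [List.getElem_zip, List.getD_eq_getElem, hiq, hir]

-- B's painted array is exactly that positional symbol list
theorem pvPaint (ql rl : List Char) :
    (((List.range (min ql.length rl.length)).filter
        (fun i => ql.getD i ' ' == rl.getD i ' ')).foldl (fun a i => a.set i '|')
      (((List.range (min ql.length rl.length)).filter
          (fun i => !(ql.getD i ' ' == rl.getD i ' ')
            && (ql.getD i ' ' == '-' || rl.getD i ' ' == '-'))).foldl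
        (fun a i => a.set i '-') (List.replicate (min ql.length rl.length) ':')))
      = (List.range (min ql.length rl.length)).map
          (fun i => pvSym (ql.getD i ' ', rl.getD i ' ')) := by
  apply List.ext_getElem
  · simp [pvFoldSet_length]
  · intro j h1 h2
    have hj : j < min ql.length rl.length := by
      simpa [pvFoldSet_length] using h1
    have hj1 : j < ((((List.range (min ql.length rl.length)).filter
        (fun i => !(ql.getD i ' ' == rl.getD i ' ')
          && (ql.getD i ' ' == '-' || rl.getD i ' ' == '-'))).foldl
        (fun a i => a.set i '-')
        (List.replicate (min ql.length rl.length) ':'))).length := by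
      simp [pvFoldSet_length, hj]
    rw [pvFoldSet_getElem _ _ _ _ hj1]
    rw [pvFoldSet_getElem _ _ _ _ (by simp [hj])]
    simp only [List.mem_filter, List.mem_range, hj, true_and, List.getElem_replicate,
      List.getElem_map, List.getElem_range]
    exact pvCell _ _


theorem string_alignment_eq (q r : String) :
    string_alignment q r = string_alignment_alt q r := by
  simp only [string_alignment, string_alignment_alt]
  rw [pvFoldA_eq, pvMap_zip, pvPaint]
  have hm := pvCountRange (min q.toList.length r.toList.length) '|'
    (fun i => pvSym (q.toList.getD i ' ', r.toList.getD i ' '))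
    (fun i => q.toList.getD i ' ' == r.toList.getD i ' ')
    (fun i => pvSym_eq_bar _ _)
  have hg := pvCountRange (min q.toList.length r.toList.length) '-'
    (fun i => pvSym (q.toList.getD i ' ', r.toList.getD i ' '))
    (fun i => !(q.toList.getD i ' ' == r.toList.getD i ' ')
      && (q.toList.getD i ' ' == '-' || r.toList.getD i ' ' == '-'))
    (fun i => pvSym_eq_dash _ _)
  have hc := pvCountRange (min q.toList.length r.toList.length) ':'
    (fun i => pvSym (q.toList.getD i ' ', r.toList.getD i ' '))
    (fun i => !(q.toList.getD i ' ' == r.toList.getD i ' ')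
      && !(!(q.toList.getD i ' ' == r.toList.getD i ' ')
        && (q.toList.getD i ' ' == '-' || r.toList.getD i ' ' == '-')))
    (fun i => pvSym_eq_colon _ _)
  have htri := pvCountP_tri (List.range (min q.toList.length r.toList.length))
    (fun i => q.toList.getD i ' ' == r.toList.getD i ' ')
    (fun i => !(q.toList.getD i ' ' == r.toList.getD i ' ')
      && (q.toList.getD i ' ' == '-' || r.toList.getD i ' ' == '-'))
    (fun i => !(q.toList.getD i ' ' == r.toList.getD i ' ')
      && !(!(q.toList.getD i ' ' == r.toList.getD i ' ')
        && (q.toList.getD i ' ' == '-' || r.toList.getD i ' ' == '-')))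
    (fun a => rfl)
    (by
      intro a ha
      show (!(q.toList.getD a ' ' == r.toList.getD a ' ')
        && (q.toList.getD a ' ' == '-' || r.toList.getD a ' ' == '-')) = false
      rw [show (q.toList.getD a ' ' == r.toList.getD a ' ') = true from ha]
      simp)
  rw [pvLenFilter] at hm hg hc
  simp only [pvLenFilter, List.length_range] at htri ⊢
  rw [hm, hg, hc]
  refine Prod.ext rfl (Prod.ext (by push_cast; ring) (Prod.ext (by push_cast; ring) ?_))
  simp only [zero_add]
  push_cast
  omega

-- ===== VERDICT (by name: the statement is the Claim_ definition above) =====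
theorem string_alignment_spec : Claim_equal_string_alignment := by
  intro q r _
  unfold Spec_string_alignment
  exact string_alignment_eq q r
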